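-- pv_equiv track=rewrite | github.com/savaleyash004/PasswordShield | src/utils/feature_extraction.py | _consecSymbolTransform
-- ===== SOURCE A (Python) =====
-- import unicodedata
--
-- def _consecSymbolTransform(text: str) -> int:
--     """Calculate the count of consecutive special symbol characters in the input text.
--
--     Args:
--         text (str): Input text.
--
--     Returns:
--         int: Count of consecutive special symbol characters in the input text.
--     """
--     temp = ""
--     nConsecSymbol = 0
--
--     for a in text:
--         # Check if character is a symbol or punctuation
--         is_symbol = unicodedata.category(a).startswith(('S', 'P'))
--
--         if is_symbol:
--             if temp and unicodedata.category(temp[-1]).startswith(('S', 'P')):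
--                 nConsecSymbol += 1
--             temp = a
--         else:
--             temp = a
--
--     return nConsecSymbol
-- ===== SOURCE B (Python) =====
-- import unicodedata
--
-- def _consecSymbolTransform(text: str) -> int:
--     # Mask every non-symbol character to a space, so maximal runs of
--     # symbol/punctuation characters become the whitespace-separated words.
--     masked = ''.join(c if unicodedata.category(c).startswith(('S', 'P')) else ' ' for c in text)
--     # A run of k symbols contains exactly k - 1 adjacent symbol pairs.
--     return sum(len(run) - 1 for run in masked.split())
-- ===== Notes on version B (the rewrite author's own statement) =====
-- stated objective: alternative
-- what changed: Replaces A's stateful single sweep over characters (pair counter carrying the previous character) with a mask-and-split decomposition: non-symbol characters are replaced by spaces, the masked string is split() into maximal symbol runs, and the answer is the sum of len(run)-1 over the runs.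
import Mathlib
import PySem

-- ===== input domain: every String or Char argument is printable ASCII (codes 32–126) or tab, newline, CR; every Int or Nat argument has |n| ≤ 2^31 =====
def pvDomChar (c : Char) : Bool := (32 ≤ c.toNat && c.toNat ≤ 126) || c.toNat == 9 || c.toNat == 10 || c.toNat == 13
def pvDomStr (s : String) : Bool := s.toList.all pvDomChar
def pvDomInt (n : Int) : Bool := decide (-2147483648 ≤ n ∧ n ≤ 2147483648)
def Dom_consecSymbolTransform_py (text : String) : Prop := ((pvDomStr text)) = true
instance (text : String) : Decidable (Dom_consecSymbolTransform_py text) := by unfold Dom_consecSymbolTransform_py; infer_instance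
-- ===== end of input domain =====

-- B replaces A's stateful previous-character sweep with a mask-to-spaces + split() + sum of
-- (run length - 1) decomposition (objective: alternative, same O(n) cost).

-- unicodedata.category(c).startswith(('S','P')): ported by hand; exact on the Dom_ ASCII
-- domain, where the S*/P* categories are exactly the printable non-alphanumeric, non-space chars.
def pvIsSymbol (c : Char) : Bool := 33 ≤ c.toNat && c.toNat ≤ 126 && !c.isAlphanum

-- ===== PORT A =====
-- state = (temp : List Char, nConsecSymbol)
def consecSymbolTransform_py (text : String) : Int :=
  (text.toList.foldl
    (fun (st : List Char × Int) a =>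
      let is_symbol := pvIsSymbol a
      if is_symbol then
        if (match st.1.getLast? with | some t => pvIsSymbol t | none => false) then
          ([a], st.2 + 1)
        else
          ([a], st.2)
      else
        ([a], st.2))
    ([], 0)).2

-- ===== PORT B =====
def consecSymbolTransform_py_alt (text : String) : Int :=
  let masked := text.toList.map (fun c => if pvIsSymbol c then c else ' ')
  ((PySem.Chars.split₀ masked).map (fun run => (run.length : Int) - 1)).sum

-- ===== PRECONDITION & SPEC =====
def Spec_consecSymbolTransform_py (text : String) (out : Int) : Prop := out = consecSymbolTransform_py_alt text
instance (text : String) (out : Int) : Decidable (Spec_consecSymbolTransform_py text out) := by unfold Spec_consecSymbolTransform_py; infer_instance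

-- ===== CLAIM (what is proved, stated in full; the proofs are below) =====
def Claim_equal_consecSymbolTransform_py : Prop := ∀ (text : String), Dom_consecSymbolTransform_py text → Spec_consecSymbolTransform_py text (consecSymbolTransform_py text)

-- ===== LEMMAS AND PROOFS =====

-- adjacent-pair count threaded with the previous flag
def pvPC (prev : Bool) : List Bool → Int
  | [] => 0
  | f :: fs => (if prev && f then 1 else 0) + pvPC f fs

def pvStep (st : List Char × Int) (a : Char) : List Char × Int :=
  let is_symbol := pvIsSymbol a
  if is_symbol then
    if (match st.1.getLast? with | some t => pvIsSymbol t | none => false) then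
      ([a], st.2 + 1)
    else
      ([a], st.2)
  else
    ([a], st.2)

def pvLastFlag (t : List Char) : Bool :=
  match t.getLast? with | some c => pvIsSymbol c | none => false

lemma pvStep_eq (st : List Char × Int) (a : Char) :
    pvStep st a = ([a], st.2 + (if pvLastFlag st.1 && pvIsSymbol a then 1 else 0)) := by
  simp only [pvStep]
  have hm : (match st.1.getLast? with | some t => pvIsSymbol t | none => false) = pvLastFlag st.1 := rfl
  rw [hm]
  by_cases h : pvIsSymbol a = true <;> by_cases h2 : pvLastFlag st.1 = true <;> simp [h, h2]

lemma pvFoldA (l : List Char) : ∀ (t : List Char) (n : Int),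
    (l.foldl pvStep (t, n)).2 = n + pvPC (pvLastFlag t) (l.map pvIsSymbol) := by
  induction l with
  | nil => intro t n; simp [pvPC]
  | cons a l ih =>
    intro t n
    simp only [List.foldl_cons, List.map_cons, pvPC]
    rw [pvStep_eq (t, n) a, ih]
    have h1 : pvLastFlag [a] = pvIsSymbol a := by simp [pvLastFlag]
    rw [h1]; ring

-- sum of (run length - 1) over a list of words
def pvSW (ws : List (List Char)) : Int := (ws.map (fun run => (run.length : Int) - 1)).sum

lemma pvSW_append (xs ys : List (List Char)) : pvSW (xs ++ ys) = pvSW xs + pvSW ys := by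
  simp [pvSW]

-- equation lemmas for split₀.go
lemma pvGo_eq_nil (cur : List Char) (acc : List (List Char)) :
    PySem.Chars.split₀.go [] cur acc
      = if cur.isEmpty then acc.reverse else (cur.reverse :: acc).reverse := by
  rw [PySem.Chars.split₀.go]

lemma pvGo_eq_cons (c : Char) (rest cur : List Char) (acc : List (List Char)) :
    PySem.Chars.split₀.go (c :: rest) cur acc
      = if PySem.Chars.isspace c then
          (if cur.isEmpty then PySem.Chars.split₀.go rest [] acc
           else PySem.Chars.split₀.go rest [] (cur.reverse :: acc))
        else PySem.Chars.split₀.go rest (c :: cur) acc := by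
  rw [PySem.Chars.split₀.go]

-- accumulator independence
lemma pvGo_acc (s : List Char) : ∀ (cur : List Char) (acc : List (List Char)),
    PySem.Chars.split₀.go s cur acc = acc.reverse ++ PySem.Chars.split₀.go s cur [] := by
  induction s with
  | nil =>
    intro cur acc
    rw [pvGo_eq_nil, pvGo_eq_nil]
    by_cases h : cur.isEmpty <;> simp [h]
  | cons c rest ih =>
    intro cur acc
    rw [pvGo_eq_cons, pvGo_eq_cons]
    by_cases hs : PySem.Chars.isspace c
    · simp only [hs, if_true]
      by_cases hc : cur.isEmpty
      · simp only [hc, if_true]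
        exact ih [] acc
      · simp only [Bool.not_eq_true] at hc
        simp only [hc, Bool.false_eq_true, if_false]
        rw [ih [] (cur.reverse :: acc), ih [] [cur.reverse]]
        simp
    · simp only [Bool.not_eq_true] at hs
      simp only [hs, Bool.false_eq_true, if_false]
      exact ih (c :: cur) acc

-- main invariant: pair count over the non-space flags = sum of (run length - 1)
lemma pvGoCount (s : List Char) : ∀ (cur : List Char),
    pvSW (PySem.Chars.split₀.go s cur [])
      = (if cur.isEmpty then 0 else (cur.length : Int) - 1)
        + pvPC (!cur.isEmpty) (s.map (fun c => !PySem.Chars.isspace c)) := by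
  induction s with
  | nil =>
    intro cur
    rw [pvGo_eq_nil]
    by_cases h : cur.isEmpty <;> simp [h, pvSW, pvPC]
  | cons c rest ih =>
    intro cur
    rw [pvGo_eq_cons]
    by_cases hs : PySem.Chars.isspace c
    · simp only [hs, if_true, List.map_cons, pvPC]
      by_cases hc : cur.isEmpty
      · simp only [hc, if_true]
        rw [ih []]
        simp
      · simp only [Bool.not_eq_true] at hc
        simp only [hc, Bool.false_eq_true, if_false]
        rw [pvGo_acc, pvSW_append, ih []]
        simp [pvSW]
    · simp only [Bool.not_eq_true] at hs
      simp only [hs, Bool.false_eq_true, if_false, List.map_cons, pvPC]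
      rw [ih (c :: cur)]
      by_cases hc : cur.isEmpty
      · rw [List.isEmpty_iff] at hc
        subst hc
        simp
      · simp only [Bool.not_eq_true] at hc
        simp only [hc, List.isEmpty_cons, Bool.false_eq_true, if_false, List.length_cons,
          Bool.not_false, Bool.and_true]
        push_cast
        ring

-- on any char, the masked character's non-space flag is the symbol flag
lemma pvMaskFlag (c : Char) :
    (!PySem.Chars.isspace (if pvIsSymbol c then c else ' ')) = pvIsSymbol c := by
  by_cases h : pvIsSymbol c = true
  · simp only [h, if_true]
    have : PySem.Chars.isspace c = false := by
      have h33 : 33 ≤ c.toNat ∧ c.toNat ≤ 126 := by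
        simp only [pvIsSymbol, Bool.and_eq_true, decide_eq_true_eq] at h
        exact ⟨h.1.1, h.1.2⟩
      simp only [PySem.Chars.isspace]
      simp only [Bool.or_eq_false_iff, Bool.and_eq_false_iff, decide_eq_false_iff_not]
      omega
    simp [this]
  · simp only [Bool.not_eq_true] at h
    simp [h, PySem.Chars.isspace]

-- ===== VERDICT (by name: the statement is the Claim_ definition above) =====
theorem consecSymbolTransform_py_spec : Claim_equal_consecSymbolTransform_py := by
  intro text _
  unfold Spec_consecSymbolTransform_py consecSymbolTransform_py consecSymbolTransform_py_alt
  have hA : (text.toList.foldl pvStep ([], (0 : Int))).2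
      = 0 + pvPC (pvLastFlag []) (text.toList.map pvIsSymbol) := pvFoldA _ _ _
  show (text.toList.foldl pvStep ([], 0)).2 = _
  rw [hA]
  show _ = pvSW (PySem.Chars.split₀ (text.toList.map (fun c => if pvIsSymbol c then c else ' ')))
  rw [show PySem.Chars.split₀ = fun s => PySem.Chars.split₀.go s [] [] from rfl]
  rw [pvGoCount]
  simp only [List.isEmpty_nil, if_true, List.map_map]
  have hflags : ((fun c => !PySem.Chars.isspace c) ∘ fun c => if pvIsSymbol c then c else ' ')
      = pvIsSymbol := by
    funext c; exact pvMaskFlag c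
  rw [hflags]
  simp [pvLastFlag]
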